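-- pv_equiv track=rewrite | github.com/venktesh22/aoc-attempts | 2021/day03/part2.py | zip_trim
-- ===== SOURCE A (Python) =====
-- from collections import Counter
--
-- def zip_trim(row_string_list, upper=True):
--     columnintlist_list = list(zip(*row_string_list)) #first swap columns as rows
--     if upper:
--         c = Counter(columnintlist_list[0]).most_common(2)
--         if c[0][1] == c[1][1]:
--             #there is a tie.
--             char_common = '1'
--         else:
--             char_common = c[0][0] #most common
--         subset_list = [s[1:] for s in row_string_list if s[0]==char_common] #return all remaining string with first char removed
--     else:
--         c = Counter(columnintlist_list[0]).most_common(2)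
--         if c[0][1] == c[1][1]:
--             #there is a tie.
--             char_common = '0'
--         else:
--             char_common = c[1][0] #least common
--         subset_list = [s[1:] for s in row_string_list if s[0]==char_common] #return all remaining string with first char removed
--
--     return char_common, subset_list
-- ===== SOURCE B (Python) =====
-- def zip_trim(row_string_list, upper=True):
--     groups = {}
--     for s in row_string_list:
--         groups[s[0]] = groups.get(s[0], []) + [s[1:]]
--     ranked = sorted(groups.items(), key=lambda kv: len(kv[1]), reverse=True)
--     top0 = ranked[0]
--     top1 = ranked[1]
--     tie = len(top0[1]) == len(top1[1])
--     if tie: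
--         char_common = '1' if upper else '0'
--     else:
--         char_common = top0[0] if upper else top1[0]
--     return char_common, groups.get(char_common, [])
-- ===== Notes on version B (the rewrite author's own statement) =====
-- stated objective: alternative
-- what changed: B replaces A's full-matrix transpose + Counter.most_common + second filtering pass by a single bucketing pass that groups each trimmed tail under its first character in a dict, ranks the groups by size with one stable descending sort, and returns the winning bucket by dict lookup instead of re-scanning the rows.
import Mathlib
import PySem

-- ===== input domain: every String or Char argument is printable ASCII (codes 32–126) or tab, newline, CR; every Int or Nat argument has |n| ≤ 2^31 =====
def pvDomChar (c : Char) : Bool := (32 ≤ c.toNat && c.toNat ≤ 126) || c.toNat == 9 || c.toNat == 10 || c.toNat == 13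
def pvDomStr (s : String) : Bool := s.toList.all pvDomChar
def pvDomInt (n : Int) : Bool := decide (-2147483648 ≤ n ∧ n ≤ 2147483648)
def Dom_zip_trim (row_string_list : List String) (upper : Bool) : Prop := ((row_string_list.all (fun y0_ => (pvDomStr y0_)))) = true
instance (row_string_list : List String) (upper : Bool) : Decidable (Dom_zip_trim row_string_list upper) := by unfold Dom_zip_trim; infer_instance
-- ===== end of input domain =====

-- B buckets each trimmed tail under its first character in one pass and ranks the buckets by size with one stable
-- descending sort, instead of A's transpose + Counter.most_common + second filtering pass (objective: alternative).

-- ===== PORT A =====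
-- literal port of `list(zip(*row_string_list))`: transpose, truncated at the shortest row; zip() of no args is []
def pvZipStar (rows : List (List Char)) : List (List Char) :=
  match rows with
  | [] => []
  | r :: rs =>
    if h : (r :: rs).any (fun x => x.isEmpty) then []
    else ((r :: rs).map (fun x => x.headD ' ')) :: pvZipStar ((r :: rs).map List.tail)
termination_by (rows.headD []).length
decreasing_by
  simp only [List.map_cons, List.headD_cons]
  rcases r with _ | ⟨a, t⟩
  · simp at h
  · simp

def zip_trim (row_string_list : List String) (upper : Bool) : String × List String :=
  match PySem.List.pyGet? (pvZipStar (row_string_list.map String.toList)) 0 with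
  | none => ("", [])   -- columnintlist_list[0] raises IndexError: excluded by Pre_
  | some col0 =>
    -- Counter(columnintlist_list[0]).most_common(2)  (most_common(2) = stable descending sort by count, first two)
    let c := (PySem.List.sorted (PySem.Dict.counter col0).items (fun p => p.2) true).take 2
    match PySem.List.pyGet? c 0, PySem.List.pyGet? c 1 with
    | some c0, some c1 =>
      if upper then
        let ch := if c0.2 == c1.2 then '1' else c0.1
        (String.mk [ch],
         (row_string_list.filter (fun s => PySem.Str.pyGet? s 0 == some ch)).map
           (fun s => String.mk (PySem.List.slice s.toList (some 1) none)))
      else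
        let ch := if c0.2 == c1.2 then '0' else c1.1
        (String.mk [ch],
         (row_string_list.filter (fun s => PySem.Str.pyGet? s 0 == some ch)).map
           (fun s => String.mk (PySem.List.slice s.toList (some 1) none)))
    | _, _ => ("", [])   -- c[0] / c[1] raises IndexError: excluded by Pre_

-- ===== PORT B =====
-- s[0] (the bucket key); Python raises on an empty string there — excluded by Pre_, the default is never the result
def pvKey (s : String) : Char := (PySem.Str.pyGet? s 0).getD ' '
-- s[1:]
def pvTail (s : String) : List Char := PySem.List.slice s.toList (some 1) none

def zip_trim_alt (row_string_list : List String) (upper : Bool) : String × List String :=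
  let groups := row_string_list.foldl
    (fun d s => d.modify (pvKey s) [] (fun b => b ++ [pvTail s])) PySem.Dict.empty
  let ranked := PySem.List.sorted groups.items (fun kv => (kv.2.length : Int)) true
  -- ranked[0] and ranked[1]: both exist iff ranked has at least two entries (IndexError otherwise, excluded by Pre_)
  match ranked with
  | t0 :: t1 :: _ =>
    let tie := t0.2.length == t1.2.length
    let ch := if tie then (if upper then '1' else '0') else (if upper then t0.1 else t1.1)
    (String.mk [ch], (groups.getD ch []).map String.mk)
  | _ => ("", [])   -- ranked[0] / ranked[1] raises IndexError: excluded by Pre_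

-- ===== PRECONDITION & SPEC =====
-- Pre_ excludes exactly the inputs where A raises IndexError: an empty list, a row that is the empty string
-- (both make zip(*rows) have no column 0 / s[0] fail), or fewer than two distinct first characters (most_common(2)[1] fails).
def Pre_zip_trim (row_string_list : List String) (upper : Bool) : Prop :=
  row_string_list ≠ [] ∧ (∀ s ∈ row_string_list, s.toList ≠ []) ∧
    2 ≤ (PySem.List.dedup (row_string_list.map pvKey)).length
instance (row_string_list : List String) (upper : Bool) : Decidable (Pre_zip_trim row_string_list upper) := by
  unfold Pre_zip_trim; infer_instance

def pvWitness_zip_trim : List String × Bool := (["01", "10", "11"], true)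

def Spec_zip_trim (row_string_list : List String) (upper : Bool) (out : String × List String) : Prop := out = zip_trim_alt row_string_list upper
instance (row_string_list : List String) (upper : Bool) (out : String × List String) : Decidable (Spec_zip_trim row_string_list upper out) := by unfold Spec_zip_trim; infer_instance

-- ===== CLAIM (what is proved, stated in full; the proofs are below) =====
def Claim_equal_zip_trim : Prop := ∀ (row_string_list : List String) (upper : Bool), Dom_zip_trim row_string_list upper → Pre_zip_trim row_string_list upper → Spec_zip_trim row_string_list upper (zip_trim row_string_list upper)

-- ===== LEMMAS AND PROOFS =====

-- the bucketing dict, named for the proofs (definitionally the fold inside zip_trim_alt)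
def pvGroups (rows : List String) : PySem.Dict Char (List (List Char)) :=
  rows.foldl (fun d s => d.modify (pvKey s) [] (fun b => b ++ [pvTail s])) PySem.Dict.empty

-- the bucket of tails under first character c
def pvBucket (rows : List String) (c : Char) : List (List Char) :=
  (rows.filter (fun s => pvKey s == c)).map pvTail

lemma pvZipStar_pyGet0 (rows : List (List Char)) (hne : rows ≠ []) (hall : ∀ r ∈ rows, r ≠ []) :
    PySem.List.pyGet? (pvZipStar rows) 0 = some (rows.map (fun r => r.headD ' ')) := by
  rcases rows with _ | ⟨r, rs⟩
  · exact absurd rfl hne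
  · have hany : ((r :: rs).any (fun x => x.isEmpty)) = false := by
      simp only [List.any_eq_false]
      intro x hx
      simpa using hall x hx
    rw [pvZipStar]
    simp [hany, PySem.List.pyGet?, PySem.List.pyIdx?]

lemma pvStrGet0 (s : String) (h : s.toList ≠ []) :
    PySem.Str.pyGet? s 0 = some (s.toList.headD ' ') := by
  rcases hs : s.toList with _ | ⟨a, t⟩
  · exact absurd hs h
  · simp [PySem.Str.pyGet?, hs, PySem.List.pyGet?, PySem.List.pyIdx?]

lemma pvKey_eq (s : String) (h : s.toList ≠ []) : pvKey s = s.toList.headD ' ' := by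
  unfold pvKey
  rw [pvStrGet0 s h]
  rfl

lemma pvInsertBy_map {K A : Type} (before : A → A → Bool) (f : K → A) (x : K) (ys : List K) :
    PySem.List.insertBy before (f x) (ys.map f)
      = (PySem.List.insertBy (fun a b => before (f a) (f b)) x ys).map f := by
  induction ys with
  | nil => rfl
  | cons y t ih =>
    have e1 : PySem.List.insertBy before (f x) ((y :: t).map f)
        = if before (f x) (f y) then f x :: f y :: t.map f
          else f y :: PySem.List.insertBy before (f x) (t.map f) := rfl
    have e2 : PySem.List.insertBy (fun a b => before (f a) (f b)) x (y :: t)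
        = if before (f x) (f y) then x :: y :: t
          else y :: PySem.List.insertBy (fun a b => before (f a) (f b)) x t := rfl
    rw [e1, e2]
    by_cases h : before (f x) (f y) <;> simp [h, ih]

lemma pvFoldl_insertBy_map {K A : Type} (f : K → A) (key : A → Int) (S acc : List K) :
    (S.map f).foldl (fun acc x => PySem.List.insertBy (fun a b => decide (key b < key a)) x acc) (acc.map f)
      = (S.foldl (fun acc x => PySem.List.insertBy (fun a b => decide (key (f b) < key (f a))) x acc) acc).map f := by
  induction S generalizing acc with
  | nil => rfl
  | cons s t ih =>
    simp only [List.map_cons, List.foldl_cons]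
    rw [pvInsertBy_map (fun a b => decide (key b < key a)) f s acc]
    exact ih _

lemma pvSorted_rev_map {K A : Type} (f : K → A) (key : A → Int) (key' : K → Int)
    (h : ∀ k, key (f k) = key' k) (S : List K) :
    PySem.List.sorted (S.map f) key true
      = (PySem.List.sorted S key' true).map f := by
  have hk : (fun k => key (f k)) = key' := funext h
  rw [PySem.List.sorted_rev_eq_foldl_insertBy, PySem.List.sorted_rev_eq_foldl_insertBy]
  have := pvFoldl_insertBy_map f key S []
  rw [← hk]
  exact this

lemma pvGroups_getD (rows : List String) (c : Char) :
    (pvGroups rows).getD c [] = pvBucket rows c := by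
  have h := PySem.Dict.getD_foldl_modify_append
    (l := rows.map (fun s => (pvKey s, pvTail s))) (d := PySem.Dict.empty) (c := c)
  rw [List.foldl_map] at h
  simpa [pvGroups, pvBucket, List.filter_map, Function.comp, List.map_map] using h

lemma pvGroups_keys (rows : List String) :
    (pvGroups rows).keys = PySem.Set.ofList (rows.map pvKey) := by
  have h := PySem.Dict.keys_foldl_modify_key (l := rows) (key := pvKey)
    (d0 := ([] : List (List Char))) (f := fun _ s b => b ++ [pvTail s]) (d := PySem.Dict.empty)
  simpa [pvGroups, PySem.Set.update, PySem.Set.ofList_eq_foldl] using h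

lemma pvGroups_nodup (rows : List String) : (pvGroups rows).keys.Nodup :=
  PySem.Dict.nodup_keys_foldl_modify_key rows pvKey ([] : List (List Char))
    (fun _ s b => b ++ [pvTail s]) PySem.Dict.empty (by simp)

lemma pvGroups_items (rows : List String) :
    (pvGroups rows).items
      = (PySem.Set.ofList (rows.map pvKey)).map (fun k => (k, pvBucket rows k)) := by
  rw [PySem.Dict.items_eq_map_keys (pvGroups rows) (pvGroups_nodup rows) []]
  rw [pvGroups_keys]
  exact List.map_congr_left (fun k _ => by rw [pvGroups_getD])

lemma pvCount_eq_len (rows : List String) (k : Char) :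
    (rows.map pvKey).count k = (pvBucket rows k).length := by
  rw [List.count_eq_countP, List.countP_map]
  simp only [pvBucket, List.length_map, Function.comp_def]
  exact List.countP_eq_length_filter

lemma pvListGet0 (cs : List Char) (h : cs ≠ []) :
    PySem.List.pyGet? cs 0 = some (cs.headD ' ') := by
  rcases cs with _ | ⟨a, t⟩
  · exact absurd rfl h
  · simp [PySem.List.pyGet?, PySem.List.pyIdx?]

lemma pvFinal (rows : List String) (hall : ∀ s ∈ rows, s.toList ≠ []) (ch : Char) :
    (rows.filter (fun s => PySem.List.pyGet? s.toList 0 == some ch)).map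
        (fun s => String.mk (PySem.List.slice s.toList (some 1) none))
      = (pvBucket rows ch).map String.mk := by
  have hf : rows.filter (fun s => PySem.List.pyGet? s.toList 0 == some ch)
      = rows.filter (fun s => pvKey s == ch) := by
    apply List.filter_congr
    intro s hs
    rw [pvListGet0 s.toList (hall s hs), pvKey_eq s (hall s hs)]
    simp
  rw [hf]
  simp [pvBucket, pvTail, List.map_map, Function.comp]

theorem zip_trim_spec : Claim_equal_zip_trim := by
  intro rows upper _hdom hpre
  obtain ⟨hne, hall, hlen⟩ := hpre
  unfold Spec_zip_trim
  have hmapne : rows.map String.toList ≠ [] := fun h => hne (List.map_eq_nil_iff.mp h)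
  have hmapall : ∀ r ∈ rows.map String.toList, r ≠ [] := by
    intro r hr
    obtain ⟨s, hs, rfl⟩ := List.mem_map.mp hr
    exact hall s hs
  have hcol : PySem.List.pyGet? (pvZipStar (rows.map String.toList)) 0
      = some (rows.map pvKey) := by
    rw [pvZipStar_pyGet0 _ hmapne hmapall, List.map_map]
    congr 1
    exact List.map_congr_left (fun s hs => (pvKey_eq s (hall s hs)).symm)
  have hgroups : (rows.foldl (fun d s => d.modify (pvKey s) [] (fun b => b ++ [pvTail s]))
      PySem.Dict.empty) = pvGroups rows := rfl
  have hsortA : PySem.List.sorted (PySem.Dict.counter (rows.map pvKey)).items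
        (fun p => p.2) true
      = (PySem.List.sorted (PySem.Set.ofList (rows.map pvKey))
          (fun k => ((pvBucket rows k).length : Int)) true).map
          (fun k => (k, ((rows.map pvKey).count k : Int))) := by
    rw [PySem.Dict.items_counter]
    exact pvSorted_rev_map _ _ _
      (fun k => by
        show (((rows.map pvKey).count k : Nat) : Int) = (((pvBucket rows k).length : Nat) : Int)
        exact congrArg Nat.cast (pvCount_eq_len rows k)) _
  have hsortB : PySem.List.sorted (pvGroups rows).items (fun kv => (kv.2.length : Int)) true
      = (PySem.List.sorted (PySem.Set.ofList (rows.map pvKey))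
          (fun k => ((pvBucket rows k).length : Int)) true).map
          (fun k => (k, pvBucket rows k)) := by
    rw [pvGroups_items]
    exact pvSorted_rev_map _ _ _ (fun k => rfl) _
  have h2 : 2 ≤ (PySem.List.sorted (PySem.Set.ofList (rows.map pvKey))
      (fun k => ((pvBucket rows k).length : Int)) true).length := by
    rw [PySem.List.length_sorted]
    simpa [PySem.List.dedup_eq_ofList] using hlen
  obtain ⟨k0, k1, rest, hR⟩ : ∃ k0 k1 rest, PySem.List.sorted (PySem.Set.ofList (rows.map pvKey))
      (fun k => ((pvBucket rows k).length : Int)) true = k0 :: k1 :: rest := by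
    rcases e : PySem.List.sorted (PySem.Set.ofList (rows.map pvKey))
        (fun k => ((pvBucket rows k).length : Int)) true with _ | ⟨a, _ | ⟨b, t⟩⟩
    · rw [e] at h2; simp at h2
    · rw [e] at h2; simp at h2
    · exact ⟨a, b, t, rfl⟩
  have hge : (0 : Int) ≤ (rest.length : Int) + 1 := by positivity
  unfold zip_trim zip_trim_alt
  rw [hcol]
  simp only [hgroups, hsortA, hsortB, hR, List.map_cons, List.take_succ_cons, List.take_zero]
  simp only [PySem.List.pyGet?, PySem.List.pyIdx?]
  norm_num [hge]
  rw [pvCount_eq_len rows k0, pvCount_eq_len rows k1]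
  by_cases ht : (pvBucket rows k0).length = (pvBucket rows k1).length <;>
    cases upper <;>
    simp [ht, pvGroups_getD, pvFinal rows hall]

-- pvWitness sanity: Dom and Pre hold at the witness
theorem pvWitness_ok :
    Dom_zip_trim pvWitness_zip_trim.1 pvWitness_zip_trim.2 ∧
      Pre_zip_trim pvWitness_zip_trim.1 pvWitness_zip_trim.2 := by
  constructor <;> decide
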